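-- pv_equiv track=rewrite | github.com/Dukehan1/JDDC | utils.py | cut_utterances
-- ===== SOURCE A (Python) =====
-- def cut_utterances(chunk, max_num_utterance, max_seq_length):
--     '''
--     裁剪并填充utterances（在生成模型中使用）
--     '''
--     chunk = list(chunk)  # 不要让数组对象重复引用
--     utterances = []
--     temp = []
--     j = 0
--     chunk.reverse()
--     for w in chunk:
--         if w == '<s>':
--             j += 1
--         if j < 6:
--             temp.insert(0, w)
--         else:
--             if w == '<s>':
--                 utterances.append(temp)
--                 temp = []
--             else:
--                 temp.insert(0, w)
--     utterances.append(temp)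
--     utterances = utterances[:max_num_utterance]
--     utterances = utterances + (max_num_utterance - len(utterances)) * [[]]
--     utterances.reverse()
--     utterances = list(map(lambda x: x[:max_seq_length], utterances))
--     utterances = list(map(lambda x: x + (max_seq_length - len(x)) * ['<PAD>'], utterances))
--     result = []
--     for u in utterances:
--         result.extend(u)
--     return result
-- ===== SOURCE B (Python) =====
-- def _split(toks, k):
--     # split off the first k '<s>'-separated segments (requires k <= toks.count('<s>'))
--     if k == 0:
--         return [toks]
--     i = toks.index('<s>')
--     return [toks[:i]] + _split(toks[i + 1:], k - 1)
--
--
-- def cut_utterances(chunk, max_num_utterance, max_seq_length):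
--     toks = list(chunk)
--     k = max(toks.count('<s>') - 5, 0)
--     segs = _split(toks, k)          # chronological utterances, last 5 '<s>' left embedded
--     sel = segs[::-1][:max_num_utterance]
--     sel = sel + [[]] * (max_num_utterance - len(sel))
--     sel.reverse()
--     out = []
--     for u in sel:
--         t = u[:max_seq_length]
--         out += t + ['<PAD>'] * (max_seq_length - len(t))
--     return out
-- ===== Notes on version B (the rewrite author's own statement) =====
-- stated objective: alternative
-- what changed: A's single reverse-order scan with a (utterances, temp, j) state machine is replaced by a forward decomposition: count the '<s>' tokens, then a recursive splitter peels off the first count-5 '<s>'-separated segments directly with index/slice, leaving the last 5 '<s>' embedded; the pad/truncate/flatten pipeline stays the same.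
import Mathlib
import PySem

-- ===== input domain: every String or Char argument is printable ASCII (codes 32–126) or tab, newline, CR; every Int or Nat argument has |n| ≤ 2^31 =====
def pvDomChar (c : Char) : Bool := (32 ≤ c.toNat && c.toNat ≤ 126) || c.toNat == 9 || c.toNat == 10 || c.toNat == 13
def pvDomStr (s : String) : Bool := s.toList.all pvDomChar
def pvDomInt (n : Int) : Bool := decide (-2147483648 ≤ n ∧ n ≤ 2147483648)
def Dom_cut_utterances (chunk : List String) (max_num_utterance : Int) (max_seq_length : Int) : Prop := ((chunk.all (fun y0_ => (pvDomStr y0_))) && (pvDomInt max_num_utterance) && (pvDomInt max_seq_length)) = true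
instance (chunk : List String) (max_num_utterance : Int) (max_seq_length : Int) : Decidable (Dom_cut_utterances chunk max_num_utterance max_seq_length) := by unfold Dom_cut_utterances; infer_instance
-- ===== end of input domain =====

-- B replaces A's reverse-scan state machine by a forward recursive splitter on the count of '<s>' separators (alternative decomposition, same cost); neither version mutates the argument.

-- ===== PORT A =====
-- the body of A's 'for w in chunk' loop over the reversed chunk: state = (utterances, temp, j)
def cutStepA (s : List (List String) × List String × Nat) (w : String) : List (List String) × List String × Nat :=
  let j := if w = "<s>" then s.2.2 + 1 else s.2.2
  if j < 6 then (s.1, w :: s.2.1, j)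
  else if w = "<s>" then (s.1 ++ [s.2.1], [], j)
  else (s.1, w :: s.2.1, j)

def cut_utterances (chunk : List String) (max_num_utterance : Int) (max_seq_length : Int) : List String :=
  let s := chunk.reverse.foldl cutStepA ([], [], 0)
  let utterances := s.1 ++ [s.2.1]
  let utterances := PySem.List.slice utterances none (some max_num_utterance)
  let utterances := utterances ++ List.replicate (max_num_utterance - (utterances.length : Int)).toNat []
  let utterances := utterances.reverse
  let utterances := utterances.map (fun x => PySem.List.slice x none (some max_seq_length))
  let utterances := utterances.map (fun x => x ++ List.replicate (max_seq_length - (x.length : Int)).toNat "<PAD>")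
  utterances.foldl (fun result u => result ++ u) []

-- ===== PORT B =====
-- _split(toks, k): peel off the first k '<s>'-separated segments (B only calls it with k ≤ toks.count('<s>');
-- the 'none' branch, where B's Python would raise ValueError, is unreachable there — a totality guard only)
def splitB : List String → Nat → List (List String)
  | toks, 0 => [toks]
  | toks, (k+1) =>
      match PySem.List.index? toks "<s>" with
      | some i => PySem.List.slice toks none (some (i : Int)) ::
                    splitB (PySem.List.slice toks (some ((i : Int) + 1)) none) k
      | none => [toks]

def cut_utterances_alt (chunk : List String) (max_num_utterance : Int) (max_seq_length : Int) : List String :=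
  let toks := chunk
  let k := ((PySem.List.count toks "<s>" : Int) - 5).toNat
  let segs := splitB toks k
  let sel := PySem.List.slice segs.reverse none (some max_num_utterance)
  let sel := sel ++ List.replicate (max_num_utterance - (sel.length : Int)).toNat []
  let sel := sel.reverse
  sel.foldl (fun out u =>
    let t := PySem.List.slice u none (some max_seq_length)
    out ++ (t ++ List.replicate (max_seq_length - (t.length : Int)).toNat "<PAD>")) []

-- ===== PRECONDITION & SPEC =====
def Spec_cut_utterances (chunk : List String) (max_num_utterance : Int) (max_seq_length : Int) (out : List String) : Prop := out = cut_utterances_alt chunk max_num_utterance max_seq_length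
instance (chunk : List String) (max_num_utterance : Int) (max_seq_length : Int) (out : List String) : Decidable (Spec_cut_utterances chunk max_num_utterance max_seq_length out) := by unfold Spec_cut_utterances; infer_instance

-- ===== CLAIM (what is proved, stated in full; the proofs are below) =====
def Claim_equal_cut_utterances : Prop := ∀ (chunk : List String) (max_num_utterance : Int) (max_seq_length : Int), Dom_cut_utterances chunk max_num_utterance max_seq_length → Spec_cut_utterances chunk max_num_utterance max_seq_length (cut_utterances chunk max_num_utterance max_seq_length)

-- ===== LEMMAS AND PROOFS =====

-- structural reference splitter: sp l k = first k '<s>'-separated segments of l, remainder last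
def spMapHd (w : String) : List (List String) → List (List String)
  | [] => [[w]]
  | x :: xs => (w :: x) :: xs

def sp : List String → Nat → List (List String)
  | l, 0 => [l]
  | [], _+1 => [[]]
  | w :: t, k+1 => if w = "<s>" then [] :: sp t k else spMapHd w (sp t (k+1))

lemma splitB_eq_sp : ∀ (l : List String) (k : Nat), k ≤ l.count "<s>" → splitB l k = sp l k := by
  intro l
  induction l with
  | nil =>
      intro k hk
      simp only [List.count_nil, Nat.le_zero] at hk
      subst hk
      rfl
  | cons w t ih =>
      intro k hk
      cases k with
      | zero => rfl
      | succ k =>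
        by_cases hw : w = "<s>"
        · subst hw
          have h1 : PySem.List.slice ("<s>" :: t) none (some ((0 : Nat) : Int)) = [] := by
            rw [PySem.List.slice_to_natCast]; simp
          have h2 : PySem.List.slice ("<s>" :: t) (some (((0 : Nat) : Int) + 1)) none = t := by
            have he : (((0 : Nat) : Int) + 1) = ((1 : Nat) : Int) := by norm_num
            rw [he, PySem.List.slice_from_natCast]; simp
          have hkt : k ≤ t.count "<s>" := by
            simp only [List.count_cons_self] at hk; omega
          simp only [splitB, PySem.List.index?_cons_self, h1, h2, ih k hkt]
          simp [sp]
        · have hcnt : (w :: t).count "<s>" = t.count "<s>" := by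
            simp [hw]
          have hkt : k + 1 ≤ t.count "<s>" := by omega
          have hmem : "<s>" ∈ t := List.count_pos_iff.mp (by omega)
          obtain ⟨i, hi⟩ : ∃ i, PySem.List.index? t "<s>" = some i :=
            Option.isSome_iff_exists.mp ((PySem.List.index?_isSome_iff t "<s>").mpr hmem)
          have hidx : PySem.List.index? (w :: t) "<s>" = some (i + 1) := by
            rw [PySem.List.index?_cons_of_ne t hw, hi]; rfl
          have hL1 : PySem.List.slice (w :: t) none (some ((i + 1 : Nat) : Int)) =
              w :: PySem.List.slice t none (some (i : Int)) := by
            rw [PySem.List.slice_to_natCast, PySem.List.slice_to_natCast]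
            simp [List.take_succ_cons]
          have hL2 : PySem.List.slice (w :: t) (some (((i + 1 : Nat) : Int) + 1)) none =
              PySem.List.slice t (some ((i : Int) + 1)) none := by
            have e1 : (((i + 1 : Nat) : Int) + 1) = ((i + 2 : Nat) : Int) := by push_cast; ring
            have e2 : ((i : Int) + 1) = ((i + 1 : Nat) : Int) := by push_cast; ring
            rw [e1, e2, PySem.List.slice_from_natCast, PySem.List.slice_from_natCast]
            simp [List.drop_succ_cons]
          have hlhs : splitB (w :: t) (k + 1) =
              (w :: PySem.List.slice t none (some (i : Int))) ::
                splitB (PySem.List.slice t (some ((i : Int) + 1)) none) k := by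
            simp only [splitB, hidx]
            rw [hL1, hL2]
          have hrhs : splitB t (k + 1) =
              PySem.List.slice t none (some (i : Int)) ::
                splitB (PySem.List.slice t (some ((i : Int) + 1)) none) k := by
            simp only [splitB, hi]
          rw [hlhs]
          have : sp (w :: t) (k + 1) = spMapHd w (sp t (k + 1)) := by
            simp [sp, hw]
          rw [this, ← ih (k + 1) hkt, hrhs]
          rfl

lemma sp_ne_nil (l : List String) (k : Nat) : sp l k ≠ [] := by
  cases l with
  | nil => cases k <;> simp [sp]
  | cons w t =>
      cases k with
      | zero => simp [sp]
      | succ k =>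
          by_cases hw : w = "<s>"
          · simp [sp, hw]
          · simp only [sp, hw, if_false]
            cases h : sp t (k + 1) with
            | nil => simp [spMapHd]
            | cons x xs => simp [spMapHd]

lemma single_seg {a : List (List String)} {x t : List String} (h : a ++ [x] = [t]) :
    a = [] ∧ x = t := by
  rcases a with _ | ⟨b, bs⟩
  · simpa using h
  · have := congrArg List.length h; simp at this

-- one step of A's loop, case-split on the scanned word and the separator counter
lemma cutStepA_sep_lt (s : List (List String) × List String × Nat) (h : s.2.2 + 1 < 6) :
    cutStepA s "<s>" = (s.1, "<s>" :: s.2.1, s.2.2 + 1) := by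
  simp [cutStepA, h]

lemma cutStepA_sep_ge (s : List (List String) × List String × Nat) (h : ¬ s.2.2 + 1 < 6) :
    cutStepA s "<s>" = (s.1 ++ [s.2.1], [], s.2.2 + 1) := by
  simp [cutStepA, h]

lemma cutStepA_other (s : List (List String) × List String × Nat) (w : String) (hw : w ≠ "<s>") :
    cutStepA s w = (s.1, w :: s.2.1, s.2.2) := by
  simp [cutStepA, hw]

-- the loop invariant: after A's reverse scan of l, j is the '<s>'-count of l and
-- utterances ++ [temp] is the reversed segment list sp l (count-5)
lemma loop_inv (l : List String) :
    (l.reverse.foldl cutStepA ([], [], 0)).2.2 = l.count "<s>" ∧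
    (l.reverse.foldl cutStepA ([], [], 0)).1 ++ [(l.reverse.foldl cutStepA ([], [], 0)).2.1] =
      (sp l (l.count "<s>" - 5)).reverse := by
  induction l with
  | nil => exact ⟨rfl, by simp [sp]⟩
  | cons w t ih =>
      obtain ⟨ihj, ihu⟩ := ih
      have hstep : List.foldl cutStepA ([], [], 0) (w :: t).reverse =
          cutStepA (List.foldl cutStepA ([], [], 0) t.reverse) w := by
        simp [List.reverse_cons, List.foldl_append]
      rw [hstep]
      generalize hS : List.foldl cutStepA ([], [], 0) t.reverse = s at ihj ihu
      by_cases hw : w = "<s>"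
      · subst hw
        have hcnt : List.count "<s>" ("<s>" :: t) = List.count "<s>" t + 1 := by simp
        by_cases hlt : s.2.2 + 1 < 6
        · rw [cutStepA_sep_lt s hlt]
          refine ⟨by simp [hcnt, ihj], ?_⟩
          have hk0 : List.count "<s>" t - 5 = 0 := by omega
          have hk0' : List.count "<s>" ("<s>" :: t) - 5 = 0 := by omega
          rw [hk0] at ihu
          simp only [sp, List.reverse_cons, List.reverse_nil, List.nil_append] at ihu
          obtain ⟨ha, hx⟩ := single_seg ihu
          simp only [hk0', sp, List.reverse_cons, List.reverse_nil, List.nil_append, ha, hx]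
        · rw [cutStepA_sep_ge s hlt]
          refine ⟨by simp [hcnt, ihj], ?_⟩
          have hk : List.count "<s>" ("<s>" :: t) - 5 = (List.count "<s>" t - 5) + 1 := by omega
          rw [hk]
          simp only [sp, if_true, List.reverse_cons]
          rw [← ihu]
      · rw [cutStepA_other s w hw]
        have hcnt : List.count "<s>" (w :: t) = List.count "<s>" t := by simp [hw]
        by_cases hlt : List.count "<s>" t < 6
        · have hk0 : List.count "<s>" t - 5 = 0 := by omega
          refine ⟨by simp [hcnt, ihj], ?_⟩
          rw [hk0] at ihu
          simp only [sp, List.reverse_cons, List.reverse_nil, List.nil_append] at ihu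
          obtain ⟨ha, hx⟩ := single_seg ihu
          have hk0' : List.count "<s>" (w :: t) - 5 = 0 := by omega
          simp only [hk0', sp, List.reverse_cons, List.reverse_nil, List.nil_append, ha, hx]
        · refine ⟨by simp [hcnt, ihj], ?_⟩
          have hk : List.count "<s>" t - 5 = (List.count "<s>" t - 6) + 1 := by omega
          rcases hsp : sp t (List.count "<s>" t - 5) with _ | ⟨x, xs⟩
          · exact absurd hsp (sp_ne_nil t _)
          · have hrev : s.2.1 = x ∧ s.1.reverse = xs := by
              have := congrArg List.reverse ihu
              rw [hsp] at this
              simpa using this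
            have hsp' : sp (w :: t) (List.count "<s>" (w :: t) - 5) = (w :: x) :: xs := by
              rw [hcnt, hk]
              simp only [sp, hw, if_false]
              rw [← hk, hsp]
              rfl
            rw [hsp', hrev.1.symm, ← List.reverse_eq_iff.mpr hrev.2.symm]
            simp

-- ===== VERDICT (by name: the statement is the Claim_ definition above) =====
theorem cut_utterances_spec : Claim_equal_cut_utterances := by
  intro chunk m L _
  unfold Spec_cut_utterances
  simp only [cut_utterances, cut_utterances_alt]
  have hk : ((PySem.List.count chunk "<s>" : Int) - 5).toNat = chunk.count "<s>" - 5 := by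
    rw [PySem.List.count_eq]; omega
  have hus : (List.foldl cutStepA ([], [], 0) chunk.reverse).1 ++
      [(List.foldl cutStepA ([], [], 0) chunk.reverse).2.1] =
      (splitB chunk (((PySem.List.count chunk "<s>" : Int) - 5).toNat)).reverse := by
    rw [hk, splitB_eq_sp chunk _ (Nat.sub_le _ _)]
    exact (loop_inv chunk).2
  rw [hus]
  simp only [List.foldl_map]
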